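-- pv_equiv track=rewrite | github.com/Charmull/Algorithm_Python | SWEA/D5/1247. [S/W 문제해결 응용] 3일차 - 최적 경로/[S/[S/W 문제해결 응용] 3일차 - 최적 경로.py | count
-- ===== SOURCE A (Python) =====
-- def count(order, company, home, users):
--     result = 0
--     current = company
--     for i in order:
--         result += abs(users[i][0] - current[0]) + abs(users[i][1] - current[1])
--         current = users[i]
--     result += abs(home[0] - current[0]) + abs(home[1] - current[1])
--     return result
-- ===== SOURCE B (Python) =====
-- def count(order, company, home, users):
--     # Manhattan distance separates by coordinate: total cost is the total
--     # variation of the x-coordinate sequence plus that of the y-coordinate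
--     # sequence along company -> visited users -> home.
--     def tv(seq):
--         if len(seq) < 2:
--             return 0
--         return abs(seq[0] - seq[1]) + tv(seq[1:])
--     xs = [company[0]] + [users[i][0] for i in order] + [home[0]]
--     ys = [company[1]] + [users[i][1] for i in order] + [home[1]]
--     return tv(xs) + tv(ys)
-- ===== Notes on version B (the rewrite author's own statement) =====
-- stated objective: alternative
-- what changed: B decomposes the Manhattan cost by coordinate: it builds the x- and y-coordinate sequences of the route separately and sums each sequence's total variation with a recursive adjacent-difference helper, instead of A's single index loop threading a mutable 2-D current point and running total.
import Mathlib
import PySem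

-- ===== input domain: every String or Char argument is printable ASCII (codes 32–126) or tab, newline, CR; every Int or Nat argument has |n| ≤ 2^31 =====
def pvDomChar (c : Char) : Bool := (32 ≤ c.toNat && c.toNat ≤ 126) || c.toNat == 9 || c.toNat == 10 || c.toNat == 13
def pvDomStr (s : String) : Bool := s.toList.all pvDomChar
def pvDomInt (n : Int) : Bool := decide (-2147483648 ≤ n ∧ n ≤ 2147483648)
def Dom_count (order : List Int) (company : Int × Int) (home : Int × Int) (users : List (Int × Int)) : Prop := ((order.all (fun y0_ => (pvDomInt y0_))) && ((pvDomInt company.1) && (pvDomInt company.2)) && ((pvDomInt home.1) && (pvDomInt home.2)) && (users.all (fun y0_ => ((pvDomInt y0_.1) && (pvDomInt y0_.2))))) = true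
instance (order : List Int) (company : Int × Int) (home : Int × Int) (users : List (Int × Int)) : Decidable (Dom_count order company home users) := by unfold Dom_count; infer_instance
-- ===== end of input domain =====

-- B decomposes the Manhattan cost by coordinate: two staged recursive total-variation
-- passes over the x- and y-coordinate sequences, instead of A's 2-D accumulator loop.

-- ===== PORT A =====
def count (order : List Int) (company : Int × Int) (home : Int × Int) (users : List (Int × Int)) : Int :=
  -- result, current threaded through the loop; users[i] via pyGetD (in range under Pre_)
  let st := order.foldl (fun (st : Int × (Int × Int)) i =>
      let u := PySem.List.pyGetD users i (0, 0)
      (st.1 + |u.1 - st.2.1| + |u.2 - st.2.2|, u)) (0, company)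
  st.1 + |home.1 - st.2.1| + |home.2 - st.2.2|

-- ===== PORT B =====
-- tv: recursive total variation of a 1-D integer sequence (Source B's tv helper)
def count_tv : List Int → Int
  | a :: b :: t => |a - b| + count_tv (b :: t)
  | _ => 0

def count_alt (order : List Int) (company : Int × Int) (home : Int × Int) (users : List (Int × Int)) : Int :=
  let xs := company.1 :: (order.map (fun i => (PySem.List.pyGetD users i (0, 0)).1) ++ [home.1])
  let ys := company.2 :: (order.map (fun i => (PySem.List.pyGetD users i (0, 0)).2) ++ [home.2])
  count_tv xs + count_tv ys

-- ===== PRECONDITION & SPEC =====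
-- A (and B) raise IndexError when some i in order is outside users' Python index range.
def Pre_count (order : List Int) (company : Int × Int) (home : Int × Int) (users : List (Int × Int)) : Prop :=
  ∀ i ∈ order, PySem.Raise.InRange users.length i
instance (order : List Int) (company : Int × Int) (home : Int × Int) (users : List (Int × Int)) : Decidable (Pre_count order company home users) := by unfold Pre_count; infer_instance
def pvWitness_count : List Int × (Int × Int) × (Int × Int) × (List (Int × Int)) := ([1, 0, -1], (0, 0), (5, 5), [(2, 3), (4, 1)])
def Spec_count (order : List Int) (company : Int × Int) (home : Int × Int) (users : List (Int × Int)) (out : Int) : Prop := out = count_alt order company home users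
instance (order : List Int) (company : Int × Int) (home : Int × Int) (users : List (Int × Int)) (out : Int) : Decidable (Spec_count order company home users out) := by unfold Spec_count; infer_instance

-- ===== CLAIM (what is proved, stated in full; the proofs are below) =====
def Claim_equal_count : Prop := ∀ (order : List Int) (company : Int × Int) (home : Int × Int) (users : List (Int × Int)), Dom_count order company home users → Pre_count order company home users → Spec_count order company home users (count order company home users)

-- ===== LEMMAS AND PROOFS =====

-- A's threaded fold over a point list equals the two coordinate-wise total variations
theorem pvKey (ps : List (Int × Int)) (c h : Int × Int) (r : Int) :
    (let st := ps.foldl (fun (st : Int × (Int × Int)) u =>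
        (st.1 + |u.1 - st.2.1| + |u.2 - st.2.2|, u)) (r, c)
     st.1 + |h.1 - st.2.1| + |h.2 - st.2.2|)
      = r + count_tv (c.1 :: (ps.map Prod.fst ++ [h.1]))
          + count_tv (c.2 :: (ps.map Prod.snd ++ [h.2])) := by
  induction ps generalizing c r with
  | nil =>
      simp only [List.foldl_nil, List.map_nil, List.nil_append, count_tv]
      rw [abs_sub_comm h.1 c.1, abs_sub_comm h.2 c.2]; ring
  | cons u t ih =>
      simp only [List.foldl_cons, List.map_cons, List.cons_append, count_tv]
      rw [ih]
      rw [abs_sub_comm u.1 c.1, abs_sub_comm u.2 c.2]; ring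

-- ===== VERDICT (by name: the statement is the Claim_ definition above) =====
theorem count_spec : Claim_equal_count := by
  intro order company home users _ _
  unfold Spec_count count count_alt
  have h := pvKey (order.map (fun i => PySem.List.pyGetD users i (0, 0))) company home 0
  rw [List.foldl_map] at h
  simp only [List.map_map] at h
  simpa [Function.comp] using h
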